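-- pv_equiv track=rewrite | github.com/flowerdog/RenderDocMCP | renderdoc_extension/services/export_service.py | _png_unfilter
-- ===== SOURCE A (Python) =====
-- def _png_unfilter(filter_type, row, prev_row, bpp):
--     """Decode one PNG filter row. Modifies *row* in-place and returns it."""
--     if filter_type == 0:
--         pass
--     elif filter_type == 1:  # Sub
--         for i in range(bpp, len(row)):
--             row[i] = (row[i] + row[i - bpp]) & 0xFF
--     elif filter_type == 2:  # Up
--         for i in range(len(row)):
--             row[i] = (row[i] + prev_row[i]) & 0xFF
--     elif filter_type == 3:  # Average
--         for i in range(len(row)):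
--             a = row[i - bpp] if i >= bpp else 0
--             row[i] = (row[i] + (a + prev_row[i]) // 2) & 0xFF
--     elif filter_type == 4:  # Paeth
--         for i in range(len(row)):
--             a = row[i - bpp] if i >= bpp else 0
--             b = prev_row[i]
--             c = prev_row[i - bpp] if i >= bpp else 0
--             p = a + b - c
--             pa, pb, pc = abs(p - a), abs(p - b), abs(p - c)
--             if pa <= pb and pa <= pc:
--                 pr = a
--             elif pb <= pc:
--                 pr = b
--             else:
--                 pr = c
--             row[i] = (row[i] + pr) & 0xFF
--     return row
-- ===== SOURCE B (Python) =====
-- def _paeth(a, b, c):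
--     p = a + b - c
--     pa, pb, pc = abs(p - a), abs(p - b), abs(p - c)
--     if pa <= pb and pa <= pc:
--         return a
--     if pb <= pc:
--         return b
--     return c
--
--
-- def _channel(data, j, step):
--     """Every step-th byte starting at offset j."""
--     return [data[i] for i in range(j, len(data), step)]
--
--
-- def _png_unfilter(filter_type, row, prev_row, bpp):
--     """Decode by splitting the row into bpp interleaved byte channels, decoding each
--     channel independently with a left-to-right scan, then re-interleaving them."""
--     if filter_type == 1:      # Sub: per-channel running sum (the first byte has no left neighbour)
--         def scan(xs, us):
--             out = []
--             for x in xs: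
--                 out.append(x if not out else (x + out[-1]) & 0xFF)
--             return out
--     elif filter_type == 2:    # Up: elementwise
--         def scan(xs, us):
--             return [(x + u) & 0xFF for x, u in zip(xs, us)]
--     elif filter_type == 3:    # Average
--         def scan(xs, us):
--             a, out = 0, []
--             for x, b in zip(xs, us):
--                 a = (x + (a + b) // 2) & 0xFF
--                 out.append(a)
--             return out
--     elif filter_type == 4:    # Paeth
--         def scan(xs, us):
--             a, c, out = 0, 0, []
--             for x, b in zip(xs, us):
--                 a = (x + _paeth(a, b, c)) & 0xFF
--                 out.append(a)
--                 c = b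
--             return out
--     else:                     # filter 0 / unknown: row is already plain
--         return row
--     nch = min(bpp, len(row))   # channels beyond len(row) are empty
--     channels = [scan(_channel(row, j, bpp), _channel(prev_row, j, bpp)) for j in range(nch)]
--     row[:] = [channels[i % bpp][i // bpp] for i in range(len(row))]
--     return row
-- ===== Notes on version B (the rewrite author's own statement) =====
-- stated objective: alternative
-- what changed: Instead of A's five in-place index loops over the whole row, B deinterleaves the row (and prev_row) into bpp independent byte channels, decodes each channel on its own with a small left-to-right scan (Sub becomes a per-channel running sum, Up an elementwise zip), and re-interleaves the decoded channels back into the row.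
-- outside the precondition, e.g. on _png_unfilter(1, [5], [], 0): A returns [10], B raises ZeroDivisionError; on _png_unfilter(3, [7], [9], 0): A returns [15], B raises ZeroDivisionError; on _png_unfilter(2, [5], [9], 0): A returns [14], B raises ZeroDivisionError
import Mathlib
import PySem

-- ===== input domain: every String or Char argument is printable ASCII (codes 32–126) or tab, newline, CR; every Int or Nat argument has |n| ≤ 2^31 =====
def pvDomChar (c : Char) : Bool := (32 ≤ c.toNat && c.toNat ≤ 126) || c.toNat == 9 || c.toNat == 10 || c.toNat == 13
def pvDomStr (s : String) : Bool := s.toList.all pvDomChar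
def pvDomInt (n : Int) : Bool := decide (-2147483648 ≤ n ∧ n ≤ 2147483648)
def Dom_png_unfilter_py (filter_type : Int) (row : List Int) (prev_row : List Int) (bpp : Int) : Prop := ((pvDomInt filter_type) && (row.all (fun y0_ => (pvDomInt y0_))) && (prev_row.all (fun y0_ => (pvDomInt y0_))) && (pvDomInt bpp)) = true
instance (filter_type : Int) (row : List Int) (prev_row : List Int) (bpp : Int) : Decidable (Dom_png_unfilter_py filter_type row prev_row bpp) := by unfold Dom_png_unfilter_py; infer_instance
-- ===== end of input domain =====

-- B decodes each PNG filter row by deinterleaving it into bpp independent byte channels, scanning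
-- each channel on its own, and re-interleaving, instead of A's five in-place index loops over the
-- whole row; equivalence is about the RETURN value only (both Pythons also mutate `row`).


-- ===== PORT A =====
def png_unfilter_py (filter_type : Int) (row : List Int) (prev_row : List Int) (bpp : Int) : List Int :=
  if filter_type = 0 then
    row
  else if filter_type = 1 then  -- Sub
    (PySem.List.pyRange bpp (row.length : Int) 1).foldl
      (fun r i =>
        PySem.List.pySetD r i
          (PySem.Int.band (PySem.List.pyGetD r i 0 + PySem.List.pyGetD r (i - bpp) 0) 255)) row
  else if filter_type = 2 then  -- Up
    (PySem.List.pyRange 0 (row.length : Int) 1).foldl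
      (fun r i =>
        PySem.List.pySetD r i
          (PySem.Int.band (PySem.List.pyGetD r i 0 + PySem.List.pyGetD prev_row i 0) 255)) row
  else if filter_type = 3 then  -- Average
    (PySem.List.pyRange 0 (row.length : Int) 1).foldl
      (fun r i =>
        PySem.List.pySetD r i
          (let a := if bpp ≤ i then PySem.List.pyGetD r (i - bpp) 0 else 0
           PySem.Int.band
             (PySem.List.pyGetD r i 0 +
               PySem.Int.floordiv (a + PySem.List.pyGetD prev_row i 0) 2) 255)) row
  else if filter_type = 4 then  -- Paeth
    (PySem.List.pyRange 0 (row.length : Int) 1).foldl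
      (fun r i =>
        PySem.List.pySetD r i
          (let a := if bpp ≤ i then PySem.List.pyGetD r (i - bpp) 0 else 0
           let b := PySem.List.pyGetD prev_row i 0
           let c := if bpp ≤ i then PySem.List.pyGetD prev_row (i - bpp) 0 else 0
           let p := a + b - c
           let pa := |p - a|
           let pb := |p - b|
           let pc := |p - c|
           let pr := if pa ≤ pb ∧ pa ≤ pc then a else if pb ≤ pc then b else c
           PySem.Int.band (PySem.List.pyGetD r i 0 + pr) 255)) row
  else
    row

-- ===== PORT B =====
def pvPaeth (a : Int) (b : Int) (c : Int) : Int :=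
  let p := a + b - c
  let pa := |p - a|
  let pb := |p - b|
  let pc := |p - c|
  if pa ≤ pb ∧ pa ≤ pc then a else if pb ≤ pc then b else c

-- every step-th byte starting at offset j  ( _channel in Source B )
def pvChannel (data : List Int) (j : Int) (step : Int) : List Int :=
  (PySem.List.pyRange j (data.length : Int) step).map (fun i => PySem.List.pyGetD data i 0)

def pvScanSub (xs : List Int) (us : List Int) : List Int :=
  xs.foldl
    (fun out x =>
      out ++ [if out = [] then x
              else PySem.Int.band (x + PySem.List.pyGetD out (-1) 0) 255]) []

def pvScanUp (xs : List Int) (us : List Int) : List Int :=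
  (xs.zip us).map (fun xu => PySem.Int.band (xu.1 + xu.2) 255)

def pvScanAvg (xs : List Int) (us : List Int) : List Int :=
  ((xs.zip us).foldl
    (fun (s : Int × List Int) xb =>
      let a := PySem.Int.band (xb.1 + PySem.Int.floordiv (s.1 + xb.2) 2) 255
      (a, s.2 ++ [a])) (0, [])).2

def pvScanPaeth (xs : List Int) (us : List Int) : List Int :=
  ((xs.zip us).foldl
    (fun (s : (Int × Int) × List Int) xb =>
      let a := PySem.Int.band (xb.1 + pvPaeth s.1.1 xb.2 s.1.2) 255
      ((a, xb.2), s.2 ++ [a])) ((0, 0), [])).2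

def png_unfilter_py_alt (filter_type : Int) (row : List Int) (prev_row : List Int) (bpp : Int) : List Int :=
  if filter_type = 1 ∨ filter_type = 2 ∨ filter_type = 3 ∨ filter_type = 4 then
    let scan : List Int → List Int → List Int :=
      if filter_type = 1 then pvScanSub
      else if filter_type = 2 then pvScanUp
      else if filter_type = 3 then pvScanAvg
      else pvScanPaeth
    let nch := min bpp (row.length : Int)   -- channels beyond len(row) are empty
    let channels := (PySem.List.pyRange 0 nch 1).map
      (fun j => scan (pvChannel row j bpp) (pvChannel prev_row j bpp))
    (PySem.List.pyRange 0 (row.length : Int) 1).map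
      (fun i =>
        PySem.List.pyGetD
          (PySem.List.pyGetD channels (PySem.Int.mod i bpp) [])
          (PySem.Int.floordiv i bpp) 0)
  else  -- filter 0 / unknown: row is already plain
    row

-- ===== PRECONDITION & SPEC =====
-- Pre_ excludes the inputs on which A raises IndexError (prev_row shorter than row for filters
-- 2/3/4; negative bpp driving indices past the ends for filters 1/3/4) and the degenerate
-- bpp ≤ 0 inputs under filters 1/2/3/4 on which A still returns a value, because B's channel
-- decomposition itself raises there (zero/negative channel count: ZeroDivisionError or IndexError).
def Pre_png_unfilter_py (filter_type : Int) (row : List Int) (prev_row : List Int) (bpp : Int) : Prop :=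
  ((filter_type = 1 ∨ filter_type = 2 ∨ filter_type = 3 ∨ filter_type = 4) → (1 ≤ bpp ∨ row = [])) ∧
  (filter_type = 1 → row = [] → 0 ≤ bpp) ∧
  ((filter_type = 2 ∨ filter_type = 3 ∨ filter_type = 4) → row.length ≤ prev_row.length)
instance (filter_type : Int) (row : List Int) (prev_row : List Int) (bpp : Int) : Decidable (Pre_png_unfilter_py filter_type row prev_row bpp) := by unfold Pre_png_unfilter_py; infer_instance

def pvWitness_png_unfilter_py : Int × List Int × List Int × Int := (4, [10, 20, 300], [5, 6, 7], 1)

def Spec_png_unfilter_py (filter_type : Int) (row : List Int) (prev_row : List Int) (bpp : Int) (out : List Int) : Prop := out = png_unfilter_py_alt filter_type row prev_row bpp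
instance (filter_type : Int) (row : List Int) (prev_row : List Int) (bpp : Int) (out : List Int) : Decidable (Spec_png_unfilter_py filter_type row prev_row bpp out) := by unfold Spec_png_unfilter_py; infer_instance

-- ===== CLAIM (what is proved, stated in full; the proofs are below) =====
def Claim_equal_png_unfilter_py : Prop := ∀ (filter_type : Int) (row : List Int) (prev_row : List Int) (bpp : Int), Dom_png_unfilter_py filter_type row prev_row bpp → Pre_png_unfilter_py filter_type row prev_row bpp → Spec_png_unfilter_py filter_type row prev_row bpp (png_unfilter_py filter_type row prev_row bpp)

-- ===== LEMMAS AND PROOFS =====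

-- ---------- A-side machinery: A's in-place index loop equals a single append pass ----------

-- proof-only helper: the decoded row built front-to-back by one append pass
def pvApass (l : List Int) (f : Int → Int → List Int → Int) : List Int :=
  (PySem.List.enumerate l 0).foldl (fun out ix => out ++ [f ix.1 ix.2 out]) []

theorem pv_set_at_len (acc : List Int) (v w : Int) (rest : List Int) {n : Nat}
    (h : n = acc.length) : (acc ++ v :: rest).set n w = acc ++ w :: rest := by
  subst h; simp

-- A's in-place loop over indices [k, row.length) started on `acc ++ row.drop k` equals the
-- append pass over the enumerated suffix started on the decoded prefix `acc`, provided the two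
-- step functions agree whenever the prefix is fully decoded.
theorem pv_bridge (row : List Int) (g : Int → List Int → Int) (f : Int → Int → List Int → Int)
    (s : Nat)
    (hyp : ∀ (k : Nat) (acc : List Int), acc.length = k → s ≤ k → (hk : k < row.length) →
      g (k : Int) (acc ++ row.drop k) = f (k : Int) row[k] acc) :
    ∀ (m k : Nat) (acc : List Int), k + m = row.length → acc.length = k → s ≤ k →
      (PySem.List.pyRange (k : Int) (row.length : Int) 1).foldl
          (fun r i => PySem.List.pySetD r i (g i r)) (acc ++ row.drop k)
        = (PySem.List.enumerate (row.drop k) (k : Int)).foldl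
            (fun out ix => out ++ [f ix.1 ix.2 out]) acc := by
  intro m
  induction m with
  | zero =>
    intro k acc hk hl hs
    rw [PySem.List.pyRange_one_eq_nil (by omega), List.drop_eq_nil_of_le (by omega)]
    simp
  | succ m ih =>
    intro k acc hk hl hs
    have hklt : k < row.length := by omega
    rw [PySem.List.pyRange_one_cons (by exact_mod_cast hklt)]
    rw [← List.getElem_cons_drop hklt, PySem.List.enumerate_cons]
    simp only [List.foldl_cons]
    have hset : PySem.List.pySetD (acc ++ row[k] :: row.drop (k+1)) (k : Int)
        (g (k : Int) (acc ++ row[k] :: row.drop (k+1)))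
        = (acc ++ [f (k : Int) row[k] acc]) ++ row.drop (k+1) := by
      rw [PySem.List.pySetD_natCast]
      have := hyp k acc hl hs hklt
      rw [List.getElem_cons_drop hklt] at *
      rw [this]
      conv_lhs => rw [← List.getElem_cons_drop hklt]
      rw [pv_set_at_len acc _ _ _ hl.symm]
      simp
    rw [hset]
    have h1 : ((k:Int) + 1) = ((k+1 : Nat) : Int) := by push_cast; ring
    rw [h1]
    exact ih (k+1) (acc ++ [f (k : Int) row[k] acc]) (by omega) (by simp [hl]) (by omega)

-- B's pass over the indices below bpp merely copies the raw bytes.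
theorem pv_copy_prefix (bpp : Int) (f : Int → Int → List Int → Int) :
    ∀ (l : List Int) (s : Int) (acc : List Int), s + l.length ≤ bpp →
      (PySem.List.enumerate l s).foldl
          (fun out ix => out ++ [if ix.1 < bpp then ix.2
                                 else f ix.1 ix.2 out]) acc = acc ++ l := by
  intro l
  induction l with
  | nil => intro s acc h; simp [PySem.List.enumerate_nil]
  | cons x xs ih =>
    intro s acc h
    rw [PySem.List.enumerate_cons, List.foldl_cons]
    simp only [List.length_cons] at h
    push_cast at h
    rw [if_pos (by omega : s < bpp)]
    rw [ih (s+1) (acc ++ [x]) (by omega)]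
    simp

theorem pv_getD_mid (acc row : List Int) (k : Nat) (h : acc.length = k) (hk : k < row.length) :
    (acc ++ row.drop k).getD k 0 = row[k] := by
  subst h
  rw [List.getD_append_right _ _ _ _ (le_refl _)]
  simp [List.getD, List.getElem?_drop]
  simp [List.getElem?_eq_getElem hk]

-- the raw byte at the write position
theorem pv_getD_here (acc row : List Int) (k : Nat) (h : acc.length = k) (hk : k < row.length) :
    PySem.List.pyGetD (acc ++ row.drop k) (k : Int) 0 = row[k] := by
  rw [PySem.List.pyGetD_natCast]
  exact pv_getD_mid acc row k h hk

-- the left-neighbour lookup lands in the decoded prefix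
theorem pv_getD_left (acc row : List Int) (k : Nat) (bpp : Int) (h : acc.length = k)
    (hb : 1 ≤ bpp) (hbk : bpp ≤ (k : Int)) :
    PySem.List.pyGetD (acc ++ row.drop k) ((k : Int) - bpp) 0
      = PySem.List.pyGetD acc ((k : Int) - bpp) 0 := by
  have h1 : (k : Int) - bpp = ((k - bpp.toNat : Nat) : Int) := by omega
  rw [h1, PySem.List.pyGetD_natCast, PySem.List.pyGetD_natCast]
  exact List.getD_append _ _ _ _ (by omega)

-- A = append pass, per filter
theorem pv_sub_apass (row : List Int) (bpp : Int) (hb : 1 ≤ bpp) :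
    (PySem.List.pyRange bpp (row.length : Int) 1).foldl
      (fun r i => PySem.List.pySetD r i
        (PySem.Int.band (PySem.List.pyGetD r i 0 + PySem.List.pyGetD r (i - bpp) 0) 255)) row
    = pvApass row (fun i x out =>
        if i < bpp then x
        else PySem.Int.band (x + PySem.List.pyGetD out (i - bpp) 0) 255) := by
  unfold pvApass
  have hm : min bpp.toNat row.length ≤ row.length := Nat.min_le_right _ _
  set m : Nat := min bpp.toNat row.length with hmdef
  have hmb : (m : Int) ≤ bpp := by omega
  -- split the append pass at m
  conv_rhs => rw [← List.take_append_drop m row, PySem.List.enumerate_append, List.foldl_append]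
  rw [pv_copy_prefix bpp
        (fun i x out => PySem.Int.band (x + PySem.List.pyGetD out (i - bpp) 0) 255)
        (row.take m) 0 [] (by simp [List.length_take]; omega)]
  simp only [List.nil_append, List.length_take, Nat.min_eq_left hm, zero_add]
  -- align A's starting index with m
  have hr : PySem.List.pyRange bpp (row.length : Int) 1
      = PySem.List.pyRange (m : Int) (row.length : Int) 1 := by
    rcases le_or_gt bpp (row.length : Int) with hle | hlt
    · have : (m : Int) = bpp := by omega
      rw [this]
    · rw [PySem.List.pyRange_one_eq_nil (by omega), PySem.List.pyRange_one_eq_nil (by omega)]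
  rw [hr]
  have hbr := pv_bridge row
    (fun i r => PySem.Int.band (PySem.List.pyGetD r i 0 + PySem.List.pyGetD r (i - bpp) 0) 255)
    (fun i x out => if i < bpp then x
                    else PySem.Int.band (x + PySem.List.pyGetD out (i - bpp) 0) 255)
    m
    (by
      intro k acc hlen hsk hk
      have hbk : bpp ≤ (k : Int) := by omega
      simp only
      rw [if_neg (by omega), pv_getD_here acc row k hlen hk, pv_getD_left acc row k bpp hlen hb hbk])
    (row.length - m) m (row.take m) (by omega) (by simp [List.length_take, Nat.min_eq_left hm]) (le_refl m)
  rw [List.take_append_drop] at hbr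
  exact hbr

theorem pv_up_apass (row prev_row : List Int) :
    (PySem.List.pyRange 0 (row.length : Int) 1).foldl
      (fun r i => PySem.List.pySetD r i
        (PySem.Int.band (PySem.List.pyGetD r i 0 + PySem.List.pyGetD prev_row i 0) 255)) row
    = pvApass row (fun i x out =>
        PySem.Int.band (x + PySem.List.pyGetD prev_row i 0) 255) := by
  unfold pvApass
  have h1 := pv_bridge row
    (fun i r => PySem.Int.band (PySem.List.pyGetD r i 0 + PySem.List.pyGetD prev_row i 0) 255)
    (fun i x out => PySem.Int.band (x + PySem.List.pyGetD prev_row i 0) 255)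
    0
    (by
      intro k acc hlen hsk hk
      simp only
      rw [pv_getD_here acc row k hlen hk])
    row.length 0 [] (by omega) rfl (Nat.zero_le _)
  simpa using h1

theorem pv_avg_apass (row prev_row : List Int) (bpp : Int) (hb : 1 ≤ bpp) :
    (PySem.List.pyRange 0 (row.length : Int) 1).foldl
      (fun r i => PySem.List.pySetD r i
        (let a := if bpp ≤ i then PySem.List.pyGetD r (i - bpp) 0 else 0
         PySem.Int.band
           (PySem.List.pyGetD r i 0 +
             PySem.Int.floordiv (a + PySem.List.pyGetD prev_row i 0) 2) 255)) row
    = pvApass row (fun i x out =>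
        let a := if bpp ≤ i then PySem.List.pyGetD out (i - bpp) 0 else 0
        PySem.Int.band (x + PySem.Int.floordiv (a + PySem.List.pyGetD prev_row i 0) 2) 255) := by
  unfold pvApass
  have h1 := pv_bridge row
    (fun i r =>
      let a := if bpp ≤ i then PySem.List.pyGetD r (i - bpp) 0 else 0
      PySem.Int.band
        (PySem.List.pyGetD r i 0 +
          PySem.Int.floordiv (a + PySem.List.pyGetD prev_row i 0) 2) 255)
    (fun i x out =>
      let a := if bpp ≤ i then PySem.List.pyGetD out (i - bpp) 0 else 0
      PySem.Int.band (x + PySem.Int.floordiv (a + PySem.List.pyGetD prev_row i 0) 2) 255)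
    0
    (by
      intro k acc hlen hsk hk
      simp only
      rw [pv_getD_here acc row k hlen hk]
      by_cases hbk : bpp ≤ (k : Int)
      · simp only [if_pos hbk, pv_getD_left acc row k bpp hlen hb hbk]
      · simp only [if_neg hbk])
    row.length 0 [] (by omega) rfl (Nat.zero_le _)
  simpa using h1

theorem pv_paeth_apass (row prev_row : List Int) (bpp : Int) (hb : 1 ≤ bpp) :
    (PySem.List.pyRange 0 (row.length : Int) 1).foldl
      (fun r i => PySem.List.pySetD r i
        (let a := if bpp ≤ i then PySem.List.pyGetD r (i - bpp) 0 else 0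
         let b := PySem.List.pyGetD prev_row i 0
         let c := if bpp ≤ i then PySem.List.pyGetD prev_row (i - bpp) 0 else 0
         let p := a + b - c
         let pa := |p - a|
         let pb := |p - b|
         let pc := |p - c|
         let pr := if pa ≤ pb ∧ pa ≤ pc then a else if pb ≤ pc then b else c
         PySem.Int.band (PySem.List.pyGetD r i 0 + pr) 255)) row
    = pvApass row (fun i x out =>
        let a := if bpp ≤ i then PySem.List.pyGetD out (i - bpp) 0 else 0
        let c := if bpp ≤ i then PySem.List.pyGetD prev_row (i - bpp) 0 else 0
        PySem.Int.band (x + pvPaeth a (PySem.List.pyGetD prev_row i 0) c) 255) := by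
  unfold pvApass
  have h1 := pv_bridge row
    (fun i r =>
      let a := if bpp ≤ i then PySem.List.pyGetD r (i - bpp) 0 else 0
      let b := PySem.List.pyGetD prev_row i 0
      let c := if bpp ≤ i then PySem.List.pyGetD prev_row (i - bpp) 0 else 0
      let p := a + b - c
      let pa := |p - a|
      let pb := |p - b|
      let pc := |p - c|
      let pr := if pa ≤ pb ∧ pa ≤ pc then a else if pb ≤ pc then b else c
      PySem.Int.band (PySem.List.pyGetD r i 0 + pr) 255)
    (fun i x out =>
      let a := if bpp ≤ i then PySem.List.pyGetD out (i - bpp) 0 else 0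
      let c := if bpp ≤ i then PySem.List.pyGetD prev_row (i - bpp) 0 else 0
      PySem.Int.band (x + pvPaeth a (PySem.List.pyGetD prev_row i 0) c) 255)
    0
    (by
      intro k acc hlen hsk hk
      simp only [pvPaeth]
      rw [pv_getD_here acc row k hlen hk]
      by_cases hbk : bpp ≤ (k : Int)
      · simp only [if_pos hbk, pv_getD_left acc row k bpp hlen hb hbk]
      · simp only [if_neg hbk])
    row.length 0 [] (by omega) rfl (Nat.zero_le _)
  simpa using h1

-- ---------- the append pass equals any list satisfying its step equation pointwise ----------

theorem pv_take_getD (I : List Int) (k m : Nat) (h : m < k) :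
    (I.take k).getD m 0 = I.getD m 0 := by
  simp [List.getD, h]

theorem pv_apass_eq (l : List Int) (f : Int → Int → List Int → Int) (I : List Int)
    (hlen : I.length = l.length)
    (hstep : ∀ k, k < l.length → f (k : Int) (l.getD k 0) (I.take k) = I.getD k 0) :
    pvApass l f = I := by
  suffices h : ∀ (m k : Nat) (acc : List Int), k + m = l.length → acc = I.take k →
      (PySem.List.enumerate (l.drop k) (k : Int)).foldl
        (fun out ix => out ++ [f ix.1 ix.2 out]) acc = I by
    simpa [pvApass] using h l.length 0 [] (by omega) (by simp)
  intro m
  induction m with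
  | zero =>
    intro k acc hk hacc
    have hkl : l.length ≤ k := by omega
    have hkI : I.length ≤ k := by omega
    rw [List.drop_eq_nil_of_le hkl]
    simp [PySem.List.enumerate_nil, hacc, List.take_of_length_le hkI]
  | succ m ih =>
    intro k acc hk hacc
    have hklt : k < l.length := by omega
    rw [← List.getElem_cons_drop hklt, PySem.List.enumerate_cons, List.foldl_cons]
    have hnext : acc ++ [f (k : Int) l[k] acc] = I.take (k+1) := by
      subst hacc
      have hx : l[k] = l.getD k 0 := by
        simp [List.getD, List.getElem?_eq_getElem hklt]
      rw [hx, hstep k hklt, List.take_add_one]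
      congr 1
      have hkI : k < I.length := by omega
      rw [List.getElem?_eq_getElem hkI]
      simp [List.getD, List.getElem?_eq_getElem hkI]
    rw [hnext]
    have h1 : ((k:Int) + 1) = ((k+1 : Nat) : Int) := by push_cast; ring
    rw [h1]
    exact ih (k+1) (I.take (k+1)) (by omega) rfl

-- ---------- B-side machinery: channels, scans, interleave ----------

def pvInterleave (scan : List Int → List Int → List Int)
    (row prev_row : List Int) (bpp : Int) : List Int :=
  (PySem.List.pyRange 0 (row.length : Int) 1).map
    (fun i =>
      PySem.List.pyGetD
        (PySem.List.pyGetD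
          ((PySem.List.pyRange 0 (min bpp (row.length : Int)) 1).map
            (fun j => scan (pvChannel row j bpp) (pvChannel prev_row j bpp)))
          (PySem.Int.mod i bpp) [])
        (PySem.Int.floordiv i bpp) 0)

theorem pv_alt_interleave (ft : Int) (row prev_row : List Int) (bpp : Int)
    (h : ft = 1 ∨ ft = 2 ∨ ft = 3 ∨ ft = 4) :
    png_unfilter_py_alt ft row prev_row bpp
      = pvInterleave
          (if ft = 1 then pvScanSub else if ft = 2 then pvScanUp
           else if ft = 3 then pvScanAvg else pvScanPaeth) row prev_row bpp := by
  rcases h with h|h|h|h <;> subst h <;> simp [png_unfilter_py_alt, pvInterleave]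

theorem pv_ceil_lt (m b t : Nat) (hb : 0 < b) : t < (m + b - 1)/b ↔ b*t < m := by
  rw [Nat.lt_iff_add_one_le, Nat.le_div_iff_mul_le hb, add_mul, one_mul, mul_comm b t]
  omega

theorem pv_channel_eq (data : List Int) (j b : Nat) (hb : 0 < b) :
    pvChannel data (j : Int) (b : Int)
      = (List.range ((data.length - j + b - 1)/b)).map (fun t => data.getD (j + b*t) 0) := by
  unfold pvChannel
  rw [PySem.List.pyRange_of_pos _ _ (by exact_mod_cast hb : (0:Int) < (b:Int)), List.map_map]
  have hcnt : (if (j:Int) < ((data.length:Nat):Int)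
        then ((((data.length:Nat):Int) - (j:Int) + (b:Int) - 1) / (b:Int)).toNat else 0)
      = (data.length - j + b - 1)/b := by
    by_cases hj : j < data.length
    · rw [if_pos (by exact_mod_cast hj)]
      have h2 : (((data.length:Nat):Int) - (j:Int) + (b:Int) - 1)
          = ((data.length - j + b - 1 : Nat) : Int) := by omega
      rw [h2, ← Int.natCast_div, Int.toNat_natCast]

    · rw [if_neg (by exact_mod_cast hj)]
      symm
      apply Nat.div_eq_of_lt
      omega
  rw [hcnt]
  apply List.map_congr_left
  intro t _
  have h3 : (j:Int) + (b:Int) * (t:Int) = ((j + b*t : Nat) : Int) := by push_cast; ring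
  simp only [Function.comp_apply, h3, PySem.List.pyGetD_natCast]

theorem pv_channel_len (data : List Int) (j b : Nat) (hb : 0 < b) :
    (pvChannel data (j : Int) (b : Int)).length = (data.length - j + b - 1)/b := by
  rw [pv_channel_eq data j b hb]; simp

theorem pv_channel_getD (data : List Int) (j b t : Nat) (hb : 0 < b)
    (ht : j + b*t < data.length) :
    (pvChannel data (j : Int) (b : Int)).getD t 0 = data.getD (j + b*t) 0 := by
  rw [pv_channel_eq data j b hb]
  have htc : t < (data.length - j + b - 1)/b := (pv_ceil_lt _ b t hb).mpr (by omega)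
  simp [List.getD, htc]

theorem pv_interleave_len (scan : List Int → List Int → List Int)
    (row prev_row : List Int) (bpp : Int) :
    (pvInterleave scan row prev_row bpp).length = row.length := by
  simp [pvInterleave, PySem.List.length_pyRange_one]

theorem pv_interleave_getD (scan : List Int → List Int → List Int)
    (row prev_row : List Int) (b : Nat) (hb : 0 < b) (k : Nat) (hk : k < row.length) :
    (pvInterleave scan row prev_row (b : Int)).getD k 0
      = (scan (pvChannel row ((k % b : Nat) : Int) (b : Int))
              (pvChannel prev_row ((k % b : Nat) : Int) (b : Int))).getD (k / b) 0 := by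
  unfold pvInterleave
  have hjb : k % b < min b row.length :=
    lt_min (Nat.mod_lt _ hb) (lt_of_le_of_lt (Nat.mod_le _ _) hk)
  have hmin : min ((b:Nat):Int) ((row.length:Nat):Int) = ((min b row.length : Nat) : Int) := by
    push_cast; rfl
  rw [List.getD_eq_getElem?_getD, PySem.List.getElem?_map_pyRange_zero _ _ _ hk]
  simp only [Option.getD_some, PySem.Int.mod_natCast, PySem.Int.floordiv_natCast, hmin]
  rw [PySem.List.pyGetD_map_pyRange _ (min b row.length) _ _ hjb, PySem.List.pyGetD_natCast]

-- ---------- scan characterizations ----------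

def pvSubRec : Int → List Int → List Int
  | _, [] => []
  | a, x :: xs =>
    let a' := PySem.Int.band (x + a) 255
    a' :: pvSubRec a' xs

theorem pv_sub_go (xs : List Int) : ∀ (acc0 : List Int) (a : Int),
    xs.foldl
      (fun out x =>
        out ++ [if out = [] then x
                else PySem.Int.band (x + PySem.List.pyGetD out (-1) 0) 255]) (acc0 ++ [a])
      = acc0 ++ a :: pvSubRec a xs := by
  induction xs with
  | nil => intro acc0 a; simp [pvSubRec]
  | cons x xs ih =>
    intro acc0 a
    simp only [List.foldl_cons]
    rw [if_neg (by simp), PySem.List.pyGetD_neg_one_append_singleton]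
    have h2 : acc0 ++ [a] ++ [PySem.Int.band (x + a) 255]
        = (acc0 ++ [a]) ++ [PySem.Int.band (x + a) 255] := by simp
    rw [h2, ih (acc0 ++ [a]) (PySem.Int.band (x + a) 255)]
    simp [pvSubRec]

theorem pv_scanSub_cons (x : Int) (xs us : List Int) :
    pvScanSub (x :: xs) us = x :: pvSubRec x xs := by
  unfold pvScanSub
  simp only [List.foldl_cons, List.nil_append, if_pos]
  have := pv_sub_go xs [] x
  simpa using this

theorem pv_subRec_getD (xs : List Int) : ∀ (a : Int) (t : Nat), t < xs.length →
    (pvSubRec a xs).getD t 0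
      = PySem.Int.band (xs.getD t 0 +
          (if t = 0 then a else (pvSubRec a xs).getD (t-1) 0)) 255 := by
  induction xs with
  | nil => intro a t ht; simp at ht
  | cons x xs ih =>
    intro a t ht
    cases t with
    | zero => simp [pvSubRec]
    | succ t' =>
      simp only [pvSubRec, List.getD_cons_succ, Nat.succ_ne_zero, if_false,
        Nat.add_sub_cancel]
      rw [ih (PySem.Int.band (x + a) 255) t' (by simpa using Nat.lt_of_succ_lt_succ ht)]
      congr 1
      cases t' with
      | zero => simp
      | succ t'' => simp

theorem pv_scanSub_getD (xs us : List Int) (t : Nat) (ht : t < xs.length) :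
    (pvScanSub xs us).getD t 0
      = if t = 0 then xs.getD 0 0
        else PySem.Int.band (xs.getD t 0 + (pvScanSub xs us).getD (t-1) 0) 255 := by
  cases xs with
  | nil => simp at ht
  | cons x xs =>
    rw [pv_scanSub_cons]
    cases t with
    | zero => simp
    | succ t' =>
      simp only [Nat.succ_ne_zero, if_false, List.getD_cons_succ, Nat.add_sub_cancel]
      rw [pv_subRec_getD xs x t' (by simpa using Nat.lt_of_succ_lt_succ ht)]
      congr 1
      cases t' with
      | zero => simp
      | succ t'' => simp

def pvAvgRec : Int → List (Int × Int) → List Int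
  | _, [] => []
  | a, p :: ps =>
    let a' := PySem.Int.band (p.1 + PySem.Int.floordiv (a + p.2) 2) 255
    a' :: pvAvgRec a' ps

theorem pv_avg_go (ps : List (Int × Int)) : ∀ (a : Int) (acc : List Int),
    (ps.foldl
      (fun (s : Int × List Int) xb =>
        let a := PySem.Int.band (xb.1 + PySem.Int.floordiv (s.1 + xb.2) 2) 255
        (a, s.2 ++ [a])) (a, acc)).2 = acc ++ pvAvgRec a ps := by
  induction ps with
  | nil => intro a acc; simp [pvAvgRec]
  | cons p ps ih =>
    intro a acc
    simp only [List.foldl_cons]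
    rw [ih]
    simp [pvAvgRec]

theorem pv_scanAvg_eq (xs us : List Int) : pvScanAvg xs us = pvAvgRec 0 (xs.zip us) := by
  unfold pvScanAvg
  simpa using pv_avg_go (xs.zip us) 0 []

theorem pv_avgRec_getD (ps : List (Int × Int)) : ∀ (a : Int) (t : Nat), t < ps.length →
    (pvAvgRec a ps).getD t 0
      = PySem.Int.band ((ps.getD t (0,0)).1 +
          PySem.Int.floordiv
            ((if t = 0 then a else (pvAvgRec a ps).getD (t-1) 0) + (ps.getD t (0,0)).2) 2) 255 := by
  induction ps with
  | nil => intro a t ht; simp at ht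
  | cons p ps ih =>
    intro a t ht
    cases t with
    | zero => simp [pvAvgRec]
    | succ t' =>
      simp only [pvAvgRec, List.getD_cons_succ, Nat.succ_ne_zero, if_false,
        Nat.add_sub_cancel]
      rw [ih _ t' (by simpa using Nat.lt_of_succ_lt_succ ht)]
      congr 2
      cases t' with
      | zero => simp
      | succ t'' => simp

def pvPaethRec : Int → Int → List (Int × Int) → List Int
  | _, _, [] => []
  | a, c, p :: ps =>
    let a' := PySem.Int.band (p.1 + pvPaeth a p.2 c) 255
    a' :: pvPaethRec a' p.2 ps

theorem pv_paeth_go (ps : List (Int × Int)) : ∀ (a c : Int) (acc : List Int),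
    (ps.foldl
      (fun (s : (Int × Int) × List Int) xb =>
        let a := PySem.Int.band (xb.1 + pvPaeth s.1.1 xb.2 s.1.2) 255
        ((a, xb.2), s.2 ++ [a])) ((a, c), acc)).2 = acc ++ pvPaethRec a c ps := by
  induction ps with
  | nil => intro a c acc; simp [pvPaethRec]
  | cons p ps ih =>
    intro a c acc
    simp only [List.foldl_cons]
    rw [ih]
    simp [pvPaethRec]

theorem pv_scanPaeth_eq (xs us : List Int) : pvScanPaeth xs us = pvPaethRec 0 0 (xs.zip us) := by
  unfold pvScanPaeth
  simpa using pv_paeth_go (xs.zip us) 0 0 []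

theorem pv_paethRec_getD (ps : List (Int × Int)) : ∀ (a c : Int) (t : Nat), t < ps.length →
    (pvPaethRec a c ps).getD t 0
      = PySem.Int.band ((ps.getD t (0,0)).1 +
          pvPaeth (if t = 0 then a else (pvPaethRec a c ps).getD (t-1) 0)
                  ((ps.getD t (0,0)).2)
                  (if t = 0 then c else (ps.getD (t-1) (0,0)).2)) 255 := by
  induction ps with
  | nil => intro a c t ht; simp at ht
  | cons p ps ih =>
    intro a c t ht
    cases t with
    | zero => simp [pvPaethRec]
    | succ t' =>
      simp only [pvPaethRec, List.getD_cons_succ, Nat.succ_ne_zero, if_false,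
        Nat.add_sub_cancel]
      rw [ih _ _ t' (by simpa using Nat.lt_of_succ_lt_succ ht)]
      congr 2
      all_goals
        cases t' with
        | zero => simp
        | succ t'' => simp

-- ---------- interleave at a decomposed index, and zip access ----------

theorem pv_I_getD (scan : List Int → List Int → List Int) (row prev_row : List Int)
    (b : Nat) (hb : 0 < b) (j t : Nat) (hj : j < b) (hk : j + b*t < row.length) :
    (pvInterleave scan row prev_row (b : Int)).getD (j + b*t) 0
      = (scan (pvChannel row (j : Int) (b : Int)) (pvChannel prev_row (j : Int) (b : Int))).getD t 0 := by
  have e1 : (j + b*t) % b = j := by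
    rw [Nat.add_mul_mod_self_left]; exact Nat.mod_eq_of_lt hj
  have e2 : (j + b*t) / b = t := by
    rw [Nat.add_mul_div_left _ _ hb, Nat.div_eq_of_lt hj, Nat.zero_add]
  rw [pv_interleave_getD scan row prev_row b hb _ hk, e1, e2]

theorem pv_zip_getD (xs us : List Int) (t : Nat) (ht : t < xs.length) (hu : t < us.length) :
    (xs.zip us).getD t (0,0) = (xs.getD t 0, us.getD t 0) := by
  have hz : t < (xs.zip us).length := by rw [List.length_zip]; omega
  rw [List.getD_eq_getElem _ _ hz, List.getElem_zip, List.getD_eq_getElem _ _ ht,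
    List.getD_eq_getElem _ _ hu]

theorem pv_scanUp_getD (xs us : List Int) (t : Nat) (ht : t < xs.length) (hu : t < us.length) :
    (pvScanUp xs us).getD t 0 = PySem.Int.band (xs.getD t 0 + us.getD t 0) 255 := by
  unfold pvScanUp
  have hz : t < (xs.zip us).length := by rw [List.length_zip]; omega
  have hm : t < ((xs.zip us).map (fun xu => PySem.Int.band (xu.1 + xu.2) 255)).length := by
    simpa using hz
  rw [List.getD_eq_getElem _ _ hm, List.getElem_map, List.getElem_zip,
    List.getD_eq_getElem _ _ ht, List.getD_eq_getElem _ _ hu]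

-- channel-length bounds
theorem pv_chan_lt (data : List Int) (j b t : Nat) (hb : 0 < b)
    (h : j + b*t < data.length) : t < (pvChannel data (j : Int) (b : Int)).length := by
  rw [pv_channel_len data j b hb]
  exact (pv_ceil_lt _ b t hb).mpr (by omega)

-- ---------- per-filter pointwise step equations ----------

theorem pv_hstep_sub (row prev_row : List Int) (b : Nat) (hb : 0 < b)
    (k : Nat) (hk : k < row.length) :
    (if (k:Int) < (b:Int) then row.getD k 0
     else PySem.Int.band (row.getD k 0 +
       PySem.List.pyGetD ((pvInterleave pvScanSub row prev_row (b:Int)).take k) ((k:Int) - (b:Int)) 0) 255)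
    = (pvInterleave pvScanSub row prev_row (b:Int)).getD k 0 := by
  obtain ⟨j, t, hj, rfl⟩ : ∃ j t, j < b ∧ k = j + b * t :=
    ⟨k % b, k / b, Nat.mod_lt _ hb, (Nat.mod_add_div k b).symm⟩
  rw [pv_I_getD pvScanSub row prev_row b hb j t hj hk]
  cases t with
  | zero =>
    rw [if_pos (by exact_mod_cast (by omega : j + b*0 < b))]
    rw [pv_scanSub_getD _ _ 0 (pv_chan_lt row j b 0 hb hk), if_pos rfl]
    rw [pv_channel_getD row j b 0 hb hk]
  | succ t' =>
    have hms : b*(t'+1) = b*t' + b := Nat.mul_succ b t'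
    have hbk : ¬ ((j + b*(t'+1) : Nat) : Int) < (b:Int) := by
      have h2 : b ≤ j + b*(t'+1) := by omega
      exact not_lt.mpr (by exact_mod_cast h2)
    rw [if_neg hbk]
    have hcast : ((j + b*(t'+1) : Nat) : Int) - (b:Int) = ((j + b*t' : Nat) : Int) := by
      push_cast; ring
    rw [hcast, PySem.List.pyGetD_natCast]
    have hlt : j + b*t' < j + b*(t'+1) := by omega
    rw [pv_take_getD _ _ _ hlt]
    rw [pv_I_getD pvScanSub row prev_row b hb j t' hj (by omega)]
    rw [pv_scanSub_getD _ _ (t'+1) (pv_chan_lt row j b (t'+1) hb hk),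
      if_neg (Nat.succ_ne_zero t'), pv_channel_getD row j b (t'+1) hb hk]
    simp

theorem pv_hstep_up (row prev_row : List Int) (b : Nat) (hb : 0 < b)
    (hp : row.length ≤ prev_row.length) (k : Nat) (hk : k < row.length) :
    PySem.Int.band (row.getD k 0 + PySem.List.pyGetD prev_row (k:Int) 0) 255
    = (pvInterleave pvScanUp row prev_row (b:Int)).getD k 0 := by
  obtain ⟨j, t, hj, rfl⟩ : ∃ j t, j < b ∧ k = j + b * t :=
    ⟨k % b, k / b, Nat.mod_lt _ hb, (Nat.mod_add_div k b).symm⟩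
  rw [pv_I_getD pvScanUp row prev_row b hb j t hj hk]
  rw [pv_scanUp_getD _ _ t (pv_chan_lt row j b t hb hk) (pv_chan_lt prev_row j b t hb (by omega))]
  rw [pv_channel_getD row j b t hb hk, pv_channel_getD prev_row j b t hb (by omega)]
  rw [PySem.List.pyGetD_natCast]

theorem pv_hstep_avg (row prev_row : List Int) (b : Nat) (hb : 0 < b)
    (hp : row.length ≤ prev_row.length) (k : Nat) (hk : k < row.length) :
    PySem.Int.band (row.getD k 0 +
      PySem.Int.floordiv
        ((if (b:Int) ≤ (k:Int) then
            PySem.List.pyGetD ((pvInterleave pvScanAvg row prev_row (b:Int)).take k) ((k:Int) - (b:Int)) 0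
          else 0) + PySem.List.pyGetD prev_row (k:Int) 0) 2) 255
    = (pvInterleave pvScanAvg row prev_row (b:Int)).getD k 0 := by
  obtain ⟨j, t, hj, rfl⟩ : ∃ j t, j < b ∧ k = j + b * t :=
    ⟨k % b, k / b, Nat.mod_lt _ hb, (Nat.mod_add_div k b).symm⟩
  rw [pv_I_getD pvScanAvg row prev_row b hb j t hj hk]
  have hz : t < ((pvChannel row (j:Int) (b:Int)).zip (pvChannel prev_row (j:Int) (b:Int))).length := by
    rw [List.length_zip]
    exact lt_min (pv_chan_lt row j b t hb hk) (pv_chan_lt prev_row j b t hb (by omega))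
  rw [pv_scanAvg_eq, pv_avgRec_getD _ 0 t hz,
    pv_zip_getD _ _ t (pv_chan_lt row j b t hb hk) (pv_chan_lt prev_row j b t hb (by omega)),
    pv_channel_getD row j b t hb hk, pv_channel_getD prev_row j b t hb (by omega)]
  rw [PySem.List.pyGetD_natCast]
  cases t with
  | zero =>
    rw [if_neg (by exact_mod_cast not_le.mpr (by omega : j + b*0 < b)), if_pos rfl]
  | succ t' =>
    have hms : b*(t'+1) = b*t' + b := Nat.mul_succ b t'
    rw [if_pos (by exact_mod_cast (by omega : b ≤ j + b*(t'+1))),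
      if_neg (Nat.succ_ne_zero t')]
    have hcast : ((j + b*(t'+1) : Nat) : Int) - (b:Int) = ((j + b*t' : Nat) : Int) := by
      push_cast; ring
    rw [hcast, PySem.List.pyGetD_natCast]
    have hlt : j + b*t' < j + b*(t'+1) := by omega
    rw [pv_take_getD _ _ _ hlt,
      pv_I_getD pvScanAvg row prev_row b hb j t' hj (by omega), pv_scanAvg_eq]
    simp

theorem pv_hstep_paeth (row prev_row : List Int) (b : Nat) (hb : 0 < b)
    (hp : row.length ≤ prev_row.length) (k : Nat) (hk : k < row.length) :
    PySem.Int.band (row.getD k 0 +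
      pvPaeth
        (if (b:Int) ≤ (k:Int) then
           PySem.List.pyGetD ((pvInterleave pvScanPaeth row prev_row (b:Int)).take k) ((k:Int) - (b:Int)) 0
         else 0)
        (PySem.List.pyGetD prev_row (k:Int) 0)
        (if (b:Int) ≤ (k:Int) then PySem.List.pyGetD prev_row ((k:Int) - (b:Int)) 0 else 0)) 255
    = (pvInterleave pvScanPaeth row prev_row (b:Int)).getD k 0 := by
  obtain ⟨j, t, hj, rfl⟩ : ∃ j t, j < b ∧ k = j + b * t :=
    ⟨k % b, k / b, Nat.mod_lt _ hb, (Nat.mod_add_div k b).symm⟩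
  rw [pv_I_getD pvScanPaeth row prev_row b hb j t hj hk]
  have hz : t < ((pvChannel row (j:Int) (b:Int)).zip (pvChannel prev_row (j:Int) (b:Int))).length := by
    rw [List.length_zip]
    exact lt_min (pv_chan_lt row j b t hb hk) (pv_chan_lt prev_row j b t hb (by omega))
  rw [pv_scanPaeth_eq, pv_paethRec_getD _ 0 0 t hz,
    pv_zip_getD _ _ t (pv_chan_lt row j b t hb hk) (pv_chan_lt prev_row j b t hb (by omega)),
    pv_channel_getD row j b t hb hk, pv_channel_getD prev_row j b t hb (by omega)]
  rw [PySem.List.pyGetD_natCast]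
  cases t with
  | zero =>
    rw [if_neg (by exact_mod_cast not_le.mpr (by omega : j + b*0 < b)),
      if_neg (by exact_mod_cast not_le.mpr (by omega : j + b*0 < b)),
      if_pos rfl, if_pos rfl]
  | succ t' =>
    have hms : b*(t'+1) = b*t' + b := Nat.mul_succ b t'
    have hble : ((b:Int)) ≤ ((j + b*(t'+1) : Nat) : Int) := by
      exact_mod_cast (by omega : b ≤ j + b*(t'+1))
    rw [if_pos hble, if_pos hble, if_neg (Nat.succ_ne_zero t'), if_neg (Nat.succ_ne_zero t')]
    have hcast : ((j + b*(t'+1) : Nat) : Int) - (b:Int) = ((j + b*t' : Nat) : Int) := by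
      push_cast; ring
    rw [hcast, PySem.List.pyGetD_natCast, PySem.List.pyGetD_natCast]
    have hlt : j + b*t' < j + b*(t'+1) := by omega
    rw [pv_take_getD _ _ _ hlt,
      pv_I_getD pvScanPaeth row prev_row b hb j t' hj (by omega), pv_scanPaeth_eq]
    have hzp : ((pvChannel row (j:Int) (b:Int)).zip (pvChannel prev_row (j:Int) (b:Int))).getD t' (0,0)
        = (row.getD (j + b*t') 0, prev_row.getD (j + b*t') 0) := by
      rw [pv_zip_getD _ _ t' (pv_chan_lt row j b t' hb (by omega)) (pv_chan_lt prev_row j b t' hb (by omega)),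
        pv_channel_getD row j b t' hb (by omega), pv_channel_getD prev_row j b t' hb (by omega)]
    rw [show (t'+1-1 : Nat) = t' by omega, hzp]

-- ===== VERDICT (by name: the statement is the Claim_ definition above) =====
theorem png_unfilter_py_spec : Claim_equal_png_unfilter_py := by
  intro ft row prev_row bpp _ hpre
  obtain ⟨h1234, h1nil, h234⟩ := hpre
  unfold Spec_png_unfilter_py
  by_cases hft : ft = 1 ∨ ft = 2 ∨ ft = 3 ∨ ft = 4
  · rcases h1234 hft with hb | hnil
    · -- the real case: 1 ≤ bpp
      obtain ⟨b, rfl⟩ : ∃ b : Nat, bpp = (b:Int) := ⟨bpp.toNat, (Int.toNat_of_nonneg (by omega)).symm⟩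
      have hb0 : 0 < b := by exact_mod_cast hb
      rw [pv_alt_interleave ft row prev_row _ hft]
      rcases hft with h|h|h|h
      · subst h
        simp only [png_unfilter_py, Int.reduceEq, reduceIte]
        rw [pv_sub_apass row (b:Int) hb]
        exact pv_apass_eq row _ _ (pv_interleave_len _ _ _ _)
          (fun k hk => pv_hstep_sub row prev_row b hb0 k hk)
      · subst h
        have hp := h234 (Or.inl rfl)
        simp only [png_unfilter_py, Int.reduceEq, reduceIte]
        rw [pv_up_apass row prev_row]
        exact pv_apass_eq row _ _ (pv_interleave_len _ _ _ _)
          (fun k hk => pv_hstep_up row prev_row b hb0 hp k hk)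
      · subst h
        have hp := h234 (Or.inr (Or.inl rfl))
        simp only [png_unfilter_py, Int.reduceEq, reduceIte]
        rw [pv_avg_apass row prev_row (b:Int) hb]
        exact pv_apass_eq row _ _ (pv_interleave_len _ _ _ _)
          (fun k hk => pv_hstep_avg row prev_row b hb0 hp k hk)
      · subst h
        have hp := h234 (Or.inr (Or.inr rfl))
        simp only [png_unfilter_py, Int.reduceEq, reduceIte]
        rw [pv_paeth_apass row prev_row (b:Int) hb]
        exact pv_apass_eq row _ _ (pv_interleave_len _ _ _ _)
          (fun k hk => pv_hstep_paeth row prev_row b hb0 hp k hk)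
    · -- row = []: both sides are []
      subst hnil
      have hB : png_unfilter_py_alt ft [] prev_row bpp = [] := by
        simp only [png_unfilter_py_alt, if_pos hft]
        rw [show (([] : List Int).length : Int) = 0 by simp, PySem.List.pyRange_one_eq_nil (le_refl 0)]
        rfl
      rw [hB]
      rcases hft with h|h|h|h <;> subst h
      · have hbp : (0:Int) ≤ bpp := h1nil rfl rfl
        simp only [png_unfilter_py, Int.reduceEq, reduceIte]
        rw [show (([] : List Int).length : Int) = 0 by simp, PySem.List.pyRange_one_eq_nil hbp]
        rfl
      · simp only [png_unfilter_py, Int.reduceEq, reduceIte]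
        rw [show (([] : List Int).length : Int) = 0 by simp, PySem.List.pyRange_one_eq_nil (le_refl 0)]
        rfl
      · simp only [png_unfilter_py, Int.reduceEq, reduceIte]
        rw [show (([] : List Int).length : Int) = 0 by simp, PySem.List.pyRange_one_eq_nil (le_refl 0)]
        rfl
      · simp only [png_unfilter_py, Int.reduceEq, reduceIte]
        rw [show (([] : List Int).length : Int) = 0 by simp, PySem.List.pyRange_one_eq_nil (le_refl 0)]
        rfl
  · -- filter 0 / unknown: both sides return row
    have hB : png_unfilter_py_alt ft row prev_row bpp = row := by
      simp [png_unfilter_py_alt, hft]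
    have hf1 : ft ≠ 1 := fun h => hft (Or.inl h)
    have hf2 : ft ≠ 2 := fun h => hft (Or.inr (Or.inl h))
    have hf3 : ft ≠ 3 := fun h => hft (Or.inr (Or.inr (Or.inl h)))
    have hf4 : ft ≠ 4 := fun h => hft (Or.inr (Or.inr (Or.inr h)))
    rw [hB]
    by_cases h0 : ft = 0
    · simp [png_unfilter_py, h0]
    · simp [png_unfilter_py, h0, hf1, hf2, hf3, hf4]
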